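-- pv_equiv track=rewrite | github.com/pchen12567/Leetcode | 剑指offer/013_调整数组顺序使奇数位于偶数前面/reorder.py | reOrderArray_2
-- ===== SOURCE A (Python) =====
-- def reOrderArray_2(array):
--     result = []
--     odd_point = 0
--     for i in array:
--         if i % 2 == 0:
--             result.append(i)
--         else:
--             result.insert(odd_point, i)
--             odd_point += 1
--     return result
-- ===== SOURCE B (Python) =====
-- def reOrderArray_2(array):
--     odds = [x for x in array if x % 2 != 0]
--     evens = [x for x in array if x % 2 == 0]
--     return odds + evens
-- ===== Notes on version B (the rewrite author's own statement) =====
-- stated objective: faster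
-- what changed: Replaces the incremental insert-at-moving-index loop (each odd insert shifts the even suffix) with two parity filters concatenated (odds + evens), a linear stable partition.
import Mathlib
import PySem

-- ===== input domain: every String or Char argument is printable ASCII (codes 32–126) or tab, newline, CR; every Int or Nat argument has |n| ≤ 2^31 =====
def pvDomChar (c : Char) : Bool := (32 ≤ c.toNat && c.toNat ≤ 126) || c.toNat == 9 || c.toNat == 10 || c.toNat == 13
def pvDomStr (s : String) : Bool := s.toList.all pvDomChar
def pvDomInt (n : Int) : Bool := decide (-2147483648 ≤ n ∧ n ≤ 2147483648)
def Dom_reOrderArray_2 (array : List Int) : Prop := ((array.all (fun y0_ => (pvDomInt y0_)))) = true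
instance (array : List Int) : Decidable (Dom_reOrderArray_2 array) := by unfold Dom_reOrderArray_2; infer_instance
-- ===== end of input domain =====

-- B replaces A's insert-at-moving-index loop by two parity filters concatenated (simpler, same stable partition).

-- ===== PORT A =====
def reOrderArray_2 (array : List Int) : List Int :=
  (array.foldl
    (fun (s : List Int × Int) i =>
      if PySem.Int.mod i 2 = 0 then (s.1 ++ [i], s.2)
      else (PySem.List.insert s.1 s.2 i, s.2 + 1))
    ([], 0)).1

-- ===== PORT B =====
def reOrderArray_2_alt (array : List Int) : List Int :=
  array.filter (fun x => PySem.Int.mod x 2 != 0) ++ array.filter (fun x => PySem.Int.mod x 2 == 0)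

-- ===== PRECONDITION & SPEC =====
def Spec_reOrderArray_2 (array : List Int) (out : List Int) : Prop := out = reOrderArray_2_alt array
instance (array : List Int) (out : List Int) : Decidable (Spec_reOrderArray_2 array out) := by unfold Spec_reOrderArray_2; infer_instance

-- ===== CLAIM (what is proved, stated in full; the proofs are below) =====
def Claim_equal_reOrderArray_2 : Prop := ∀ (array : List Int), Dom_reOrderArray_2 array → Spec_reOrderArray_2 array (reOrderArray_2 array)

-- ===== LEMMAS AND PROOFS =====

-- Loop invariant: from a state (odds ++ evens, |odds|) the loop produces the
-- partitioned extension of both groups.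
theorem reOrderArray_2_loop_inv (l odds evens : List Int) :
    l.foldl
      (fun (s : List Int × Int) i =>
        if PySem.Int.mod i 2 = 0 then (s.1 ++ [i], s.2)
        else (PySem.List.insert s.1 s.2 i, s.2 + 1))
      (odds ++ evens, (odds.length : Int))
    = ((odds ++ l.filter (fun x => PySem.Int.mod x 2 != 0))
        ++ (evens ++ l.filter (fun x => PySem.Int.mod x 2 == 0)),
       ((odds ++ l.filter (fun x => PySem.Int.mod x 2 != 0)).length : Int)) := by
  induction l generalizing odds evens with
  | nil => simp
  | cons i t ih =>
    simp only [List.foldl_cons, List.filter_cons]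
    by_cases h : PySem.Int.mod i 2 = 0
    · have : (odds ++ evens) ++ [i] = odds ++ (evens ++ [i]) := by simp
      simp only [h, this]
      have := ih odds (evens ++ [i])
      simp only [h] at *
      simpa using this
    · have hins : PySem.List.insert (odds ++ evens) (odds.length : Int) i
          = (odds ++ [i]) ++ evens := by
        rw [PySem.List.insert_natCast _ _ _ (by simp)]
        simp
      have hlen : ((odds ++ [i]).length : Int) = (odds.length : Int) + 1 := by simp
      have hd : ¬ (2:Int) ∣ i := by simpa using h
      have hm : i % 2 = 1 := by omega
      rw [if_neg h, hins, ← hlen]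
      have := ih (odds ++ [i]) evens
      simpa [hm, hd] using this

-- ===== VERDICT (by name: the statement is the Claim_ definition above) =====
theorem reOrderArray_2_spec : Claim_equal_reOrderArray_2 := by
  intro array _
  unfold Spec_reOrderArray_2 reOrderArray_2 reOrderArray_2_alt
  have := reOrderArray_2_loop_inv array [] []
  simp only [List.nil_append, List.append_nil, List.length_nil, Nat.cast_zero] at this
  rw [this]
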